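-- pv_equiv track=rewrite | github.com/SukhmKang/feed-builder | app/agents/pipeline_agent/sdk.py | normalize_dispatch_agents
-- ===== SOURCE A (Python) =====
-- SOURCE_AGENT_NAMES = ("rss", "youtube", "reddit", "nitter", "tavily")
--
-- def normalize_dispatch_agents(values: list[str]) -> list[str]:
--     seen: set[str] = set()
--     normalized: list[str] = []
--     for value in values:
--         agent_name = str(value).strip().lower()
--         if agent_name not in SOURCE_AGENT_NAMES or agent_name in seen:
--             continue
--         seen.add(agent_name)
--         normalized.append(agent_name)
--     if normalized:
--         return normalized
--     return list(SOURCE_AGENT_NAMES)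
-- ===== SOURCE B (Python) =====
-- SOURCE_AGENT_NAMES = ("rss", "youtube", "reddit", "nitter", "tavily")
--
-- def normalize_dispatch_agents(values: list[str]) -> list[str]:
--     normalized = [str(v).strip().lower() for v in values]
--     ranked = sorted((name for name in SOURCE_AGENT_NAMES if name in normalized),
--                     key=normalized.index)
--     return ranked or list(SOURCE_AGENT_NAMES)
-- ===== Notes on version B (the rewrite author's own statement) =====
-- stated objective: alternative
-- what changed: Instead of A's single pass over values with an explicit seen-set, B normalizes once, then iterates over the fixed five-name candidate tuple keeping the names that occur, and sorts those by first-occurrence index (key=normalized.index), with the same empty fallback.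
import Mathlib
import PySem

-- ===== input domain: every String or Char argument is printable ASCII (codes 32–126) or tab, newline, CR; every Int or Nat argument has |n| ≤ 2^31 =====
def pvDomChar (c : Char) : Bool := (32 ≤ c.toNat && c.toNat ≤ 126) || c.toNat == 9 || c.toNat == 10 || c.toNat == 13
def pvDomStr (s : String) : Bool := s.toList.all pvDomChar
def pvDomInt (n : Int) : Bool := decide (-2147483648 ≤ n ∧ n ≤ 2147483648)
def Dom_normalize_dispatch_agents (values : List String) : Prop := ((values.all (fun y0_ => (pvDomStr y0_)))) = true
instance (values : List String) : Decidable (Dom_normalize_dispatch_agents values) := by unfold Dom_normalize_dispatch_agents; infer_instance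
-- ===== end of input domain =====

-- B replaces A's seen-set pass over values by ranking the five fixed candidate names by first-occurrence index (sort by normalized.index); an alternative algorithm of the same cost. 


def SOURCE_AGENT_NAMES : List String := ["rss", "youtube", "reddit", "nitter", "tavily"]

-- ===== PORT A =====
def normalize_dispatch_agents (values : List String) : List String :=
  let st := values.foldl
    (fun (st : PySem.Set String × List String) value =>
      let agent_name := PySem.Str.lower (PySem.Str.strip value)
      if agent_name ∉ SOURCE_AGENT_NAMES ∨ agent_name ∈ st.1 then st
      else (PySem.Set.add st.1 agent_name, st.2 ++ [agent_name]))
    (PySem.Set.empty, [])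
  if st.2 ≠ [] then st.2 else SOURCE_AGENT_NAMES

-- ===== PORT B =====
-- key=normalized.index: every kept name is in `normalized`, so Python's .index returns
-- its first index; `(index? …).getD 0` is exact there (the default is never taken).
def normalize_dispatch_agents_alt (values : List String) : List String :=
  let normalized := values.map (fun v => PySem.Str.lower (PySem.Str.strip v))
  let ranked := PySem.List.sorted
    (SOURCE_AGENT_NAMES.filter (fun name => decide (name ∈ normalized)))
    (fun name => (PySem.List.index? normalized name).getD 0) false
  if ranked ≠ [] then ranked else SOURCE_AGENT_NAMES

-- ===== PRECONDITION & SPEC =====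
def Spec_normalize_dispatch_agents (values : List String) (out : List String) : Prop := out = normalize_dispatch_agents_alt values
instance (values : List String) (out : List String) : Decidable (Spec_normalize_dispatch_agents values out) := by unfold Spec_normalize_dispatch_agents; infer_instance

-- ===== CLAIM (what is proved, stated in full; the proofs are below) =====
def Claim_equal_normalize_dispatch_agents : Prop := ∀ (values : List String), Dom_normalize_dispatch_agents values → Spec_normalize_dispatch_agents values (normalize_dispatch_agents values)

-- ===== LEMMAS AND PROOFS =====

-- reference recursion for A's loop: process normalized names left to right, keeping a
-- valid name the first time it appears; `seen` records ALL names already processed.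
def pvCore (seen : List String) : List String → List String
  | [] => []
  | n :: t =>
    if n ∈ SOURCE_AGENT_NAMES ∧ n ∉ seen then n :: pvCore (n :: seen) t
    else pvCore (n :: seen) t

-- A's loop body, on an already-normalized name
def pvStepA (st : PySem.Set String × List String) (n : String) : PySem.Set String × List String :=
  if n ∉ SOURCE_AGENT_NAMES ∨ n ∈ st.1 then st
  else (PySem.Set.add st.1 n, st.2 ++ [n])

-- A's fold over values is the fold of pvStepA over the normalized names
theorem pvA_fold_bridge (values : List String) (init : PySem.Set String × List String) :
    values.foldl
      (fun (st : PySem.Set String × List String) value =>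
        let agent_name := PySem.Str.lower (PySem.Str.strip value)
        if agent_name ∉ SOURCE_AGENT_NAMES ∨ agent_name ∈ st.1 then st
        else (PySem.Set.add st.1 agent_name, st.2 ++ [agent_name]))
      init
    = (values.map (fun v => PySem.Str.lower (PySem.Str.strip v))).foldl pvStepA init := by
  induction values generalizing init with
  | nil => simp
  | cons v t ih =>
    simp only [List.foldl_cons, List.map_cons]
    rw [ih]
    congr 1

-- A's loop produces acc ++ pvCore seen ns, provided s holds exactly the valid names among seen.
theorem pvA_loop (ns : List String) : ∀ (seen : List String) (s : PySem.Set String) (acc : List String),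
    (∀ a, a ∈ s ↔ a ∈ seen ∧ a ∈ SOURCE_AGENT_NAMES) →
    (ns.foldl pvStepA (s, acc)).2 = acc ++ pvCore seen ns := by
  induction ns with
  | nil => intro seen s acc _; simp [pvCore]
  | cons n t ih =>
    intro seen s acc hs
    by_cases hv : n ∈ SOURCE_AGENT_NAMES
    · by_cases hseen : n ∈ seen
      · have hns : n ∈ s := (hs n).2 ⟨hseen, hv⟩
        simp only [List.foldl_cons, pvStepA, if_pos (Or.inr hns)]
        rw [ih (n :: seen) s acc (fun a => by
          rw [hs a, List.mem_cons]
          constructor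
          · rintro ⟨h1, h2⟩; exact ⟨Or.inr h1, h2⟩
          · rintro ⟨rfl | h1, h2⟩
            · exact ⟨hseen, h2⟩
            · exact ⟨h1, h2⟩)]
        simp [pvCore, hv, hseen]
      · have hns : n ∉ s := fun h => hseen ((hs n).1 h).1
        simp only [List.foldl_cons, pvStepA, if_neg (not_or_intro (not_not_intro hv) hns)]
        rw [ih (n :: seen) (PySem.Set.add s n) (acc ++ [n]) (fun a => by
          rw [PySem.Set.mem_add, List.mem_cons]
          constructor
          · rintro (h | h)
            · rcases (hs a).1 h with ⟨h1, h2⟩; exact ⟨Or.inr h1, h2⟩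
            · subst h; exact ⟨Or.inl rfl, hv⟩
          · rintro ⟨h1 | h1, h2⟩
            · exact Or.inr h1
            · exact Or.inl ((hs a).2 ⟨h1, h2⟩))]
        simp [pvCore, hv, hseen]
    · simp only [List.foldl_cons, pvStepA, if_pos (Or.inl hv)]
      rw [ih (n :: seen) s acc (fun a => by
        rw [hs a, List.mem_cons]
        constructor
        · rintro ⟨h1, h2⟩; exact ⟨Or.inr h1, h2⟩
        · rintro ⟨rfl | h1, h2⟩
          · exact absurd h2 hv
          · exact ⟨h1, h2⟩)]
      simp [pvCore, hv]

-- membership in pvCore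
theorem pvCore_mem (t : List String) : ∀ (seen : List String) (a : String),
    a ∈ pvCore seen t ↔ a ∈ SOURCE_AGENT_NAMES ∧ a ∈ t ∧ a ∉ seen := by
  induction t with
  | nil => intro seen a; simp [pvCore]
  | cons n t ih =>
    intro seen a
    by_cases hk : n ∈ SOURCE_AGENT_NAMES ∧ n ∉ seen
    · rw [pvCore, if_pos hk]
      simp only [List.mem_cons, ih, not_or]
      by_cases han : a = n
      · subst han; tauto
      · tauto
    · rw [pvCore, if_neg hk]
      simp only [List.mem_cons, ih, not_or]
      by_cases han : a = n
      · subst han; tauto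
      · tauto

-- index of an element beyond a prefix it does not occur in
theorem pv_index_append (t : List String) (b : String) : ∀ (pre : List String), b ∉ pre →
    PySem.List.index? (pre ++ t) b = (PySem.List.index? t b).map (pre.length + ·) := by
  intro pre
  induction pre with
  | nil => intro _; rw [List.nil_append]; cases h : PySem.List.index? t b <;> simp
  | cons x p ih =>
    intro hb
    simp only [List.mem_cons, not_or] at hb
    have hne : x ≠ b := fun he => hb.1 he.symm
    rw [List.cons_append, PySem.List.index?_cons_of_ne _ hne, ih hb.2, Option.map_map]
    cases PySem.List.index? t b with
    | none => rfl
    | some j => simp only [Option.map_some, Function.comp_apply, List.length_cons]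
                exact congrArg some (by omega)

-- pvCore lists names in strictly increasing order of first occurrence
theorem pvCore_pairwise (t : List String) : ∀ (pre seen : List String), (∀ a ∈ pre, a ∈ seen) →
    (pvCore seen t).Pairwise (fun a b =>
      (PySem.List.index? (pre ++ t) a).getD 0 < (PySem.List.index? (pre ++ t) b).getD 0) := by
  induction t with
  | nil => intro pre seen _; simp [pvCore]
  | cons n t ih =>
    intro pre seen hps
    have hnext : ∀ a ∈ pre ++ [n], a ∈ n :: seen := by
      intro a ha
      rcases List.mem_append.1 ha with h | h
      · exact List.mem_cons_of_mem _ (hps a h)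
      · simp only [List.mem_singleton] at h; exact h ▸ List.mem_cons_self
    have hstep := ih (pre ++ [n]) (n :: seen) hnext
    rw [← List.append_cons] at hstep
    by_cases hk : n ∈ SOURCE_AGENT_NAMES ∧ n ∉ seen
    · rw [pvCore, if_pos hk]
      refine List.pairwise_cons.2 ⟨?_, hstep⟩
      intro b hb
      rcases (pvCore_mem t (n :: seen) b).1 hb with ⟨_, hbt, hbs⟩
      simp only [List.mem_cons, not_or] at hbs
      have hnpre : n ∉ pre := fun h => hk.2 (hps n h)
      have hbpre : b ∉ pre ++ [n] := by
        simp only [List.mem_append, List.mem_singleton, not_or]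
        exact ⟨fun h => hbs.2 (hps b h), hbs.1⟩
      have h1 : PySem.List.index? (pre ++ n :: t) n = some pre.length := by
        rw [pv_index_append (n :: t) n pre hnpre, PySem.List.index?_cons_self]
        simp
      rcases Option.isSome_iff_exists.1 ((PySem.List.index?_isSome_iff t b).2 hbt) with ⟨j, hj⟩
      have h2 : PySem.List.index? (pre ++ n :: t) b = some (pre.length + (j + 1)) := by
        rw [List.append_cons, pv_index_append t b (pre ++ [n]) hbpre, hj]
        simp only [Option.map_some, List.length_append, List.length_cons, List.length_nil]
        exact congrArg some (by omega)
      rw [h1, h2]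
      simp only [Option.getD_some]
      omega
    · rw [pvCore, if_neg hk]
      exact hstep

-- pvCore has no duplicates
theorem pvCore_nodup (ns : List String) : (pvCore [] ns).Nodup := by
  have h := pvCore_pairwise ns [] [] (by simp)
  refine List.Pairwise.imp_of_mem ?_ h
  intro a b _ _ hlt heq
  subst heq
  exact lt_irrefl _ hlt

theorem pv_eq (values : List String) :
    normalize_dispatch_agents_alt values = normalize_dispatch_agents values := by
  simp only [normalize_dispatch_agents, normalize_dispatch_agents_alt]
  set ns := values.map (fun v => PySem.Str.lower (PySem.Str.strip v)) with hns
  have hA : (values.foldl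
      (fun (st : PySem.Set String × List String) value =>
        let agent_name := PySem.Str.lower (PySem.Str.strip value)
        if agent_name ∉ SOURCE_AGENT_NAMES ∨ agent_name ∈ st.1 then st
        else (PySem.Set.add st.1 agent_name, st.2 ++ [agent_name]))
      (PySem.Set.empty, [])).2 = pvCore [] ns := by
    rw [pvA_fold_bridge, ← hns, pvA_loop ns [] PySem.Set.empty [] (by simp [PySem.Set.empty])]
    simp
  have hperm : (pvCore [] ns).Perm (SOURCE_AGENT_NAMES.filter (fun name => decide (name ∈ ns))) := by
    refine (List.perm_ext_iff_of_nodup (pvCore_nodup ns) (List.Nodup.filter _ (by decide))).2 ?_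
    intro a
    rw [pvCore_mem, List.mem_filter]
    simp
  have hpw := pvCore_pairwise ns [] [] (by simp)
  rw [List.nil_append] at hpw
  have hsorted : PySem.List.sorted
      (SOURCE_AGENT_NAMES.filter (fun name => decide (name ∈ ns)))
      (fun name => (PySem.List.index? ns name).getD 0) false = pvCore [] ns :=
    PySem.List.sorted_eq_of_perm_of_pairwise_lt _ _ _ hperm hpw
  rw [hA, hsorted]

-- ===== VERDICT (by name: the statement is the Claim_ definition above) =====
theorem normalize_dispatch_agents_spec : Claim_equal_normalize_dispatch_agents := by
  intro values _
  exact (pv_eq values).symm
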